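-- pv_equiv track=rewrite | github.com/msimmara/NoSpeulers | Euler/Euler506.py | SumN
-- ===== SOURCE A (Python) =====
-- def SumN(n,mod):
--     baseString = "123432"
--     currString = ""+baseString
--     currN=1
--     theSum = 0
--     for i in range(1,n+1):
--             currSum = 0
--             currV = ""
--             while(currSum<currN):
--                     if(len(currString)==0):
--                             #sumLeft = currN-currSum
--                             #baseRepeats = int(sumLeft/15)
--                             #currSum+=baseRepeats*15
--                             #if(currSum>=currN):
--                             # break
--                             currString=currString+baseString
--                     currAdd = int(currString[0])
--                     currV = currV+str(currAdd)
--                     currString = currString[1:]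
--                     currSum=currSum+currAdd
--             theSum+=int(currV)%mod
--             theSum = (theSum)%mod
--             currN+=1
--
--             print ("S("+str(currN-1)+") modded: "+str(theSum))
--             #print ("V("+str(currN-1)+") modded: "+str(int(currV)%mod))
--
--     return theSum
-- ===== SOURCE B (Python) =====
-- # Cycle-skipping closed form. The digit stream is "123432" repeated forever; one cycle
-- # has digit-sum 15. For block i we never walk digits: q = (i-1)//15 full cycles are
-- # consumed (one modular multiply each), and a fixed lookup table keyed by the current
-- # cycle offset and the leftover target rem = i - 15*q gives the count and value of the
-- # few remaining digits in one step.
-- #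
-- # STEP[r][rem] = (k, pv): starting at cycle offset r, k is the least number of stream
-- # digits whose sum reaches rem (1 <= rem <= 15, so k <= 6) and pv is the integer those
-- # k digits spell.  CYCVAL[r] = value of one full cycle read from offset r.
-- STEP = [
--     [None, (1, 1), (2, 12), (2, 12), (3, 123), (3, 123), (3, 123), (4, 1234), (4, 1234), (4, 1234), (4, 1234), (5, 12343), (5, 12343), (5, 12343), (6, 123432), (6, 123432)],
--     [None, (1, 2), (1, 2), (2, 23), (2, 23), (2, 23), (3, 234), (3, 234), (3, 234), (3, 234), (4, 2343), (4, 2343), (4, 2343), (5, 23432), (5, 23432), (6, 234321)],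
--     [None, (1, 3), (1, 3), (1, 3), (2, 34), (2, 34), (2, 34), (2, 34), (3, 343), (3, 343), (3, 343), (4, 3432), (4, 3432), (5, 34321), (6, 343212), (6, 343212)],
--     [None, (1, 4), (1, 4), (1, 4), (1, 4), (2, 43), (2, 43), (2, 43), (3, 432), (3, 432), (4, 4321), (5, 43212), (5, 43212), (6, 432123), (6, 432123), (6, 432123)],
--     [None, (1, 3), (1, 3), (1, 3), (2, 32), (2, 32), (3, 321), (4, 3212), (4, 3212), (5, 32123), (5, 32123), (5, 32123), (6, 321234), (6, 321234), (6, 321234), (6, 321234)],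
--     [None, (1, 2), (1, 2), (2, 21), (3, 212), (3, 212), (4, 2123), (4, 2123), (4, 2123), (5, 21234), (5, 21234), (5, 21234), (5, 21234), (6, 212343), (6, 212343), (6, 212343)],
-- ]
-- CYCVAL = [123432, 234321, 343212, 432123, 321234, 212343]
-- POW10 = [1, 10, 100, 1000, 10000, 100000, 1000000]
--
--
-- def SumN(n, mod):
--     total = 0
--     r = 0
--     for i in range(1, n + 1):
--         q = (i - 1) // 15             # full cycles consumed by block i
--         rem = i - 15 * q              # leftover target, 1..15
--         v = 0
--         for _ in range(q):            # value of q full cycles, mod `mod`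
--             v = (v * 1000000 + CYCVAL[r]) % mod
--         k, pv = STEP[r][rem]          # finish the block in one lookup
--         v = (v * POW10[k] + pv) % mod
--         total = (total + v) % mod
--         r = (r + k) % 6
--     return total
-- ===== Notes on version B (the rewrite author's own statement) =====
-- stated objective: faster
-- what changed: B replaces A's digit-by-digit greedy simulation (growing a digit string and re-parsing the whole block with int() each iteration) by a closed form: each block consumes q=(i-1)//15 full cycles of the repeating pattern (one modular multiply per cycle) and finishes with a single precomputed (offset, leftover-sum) table lookup, so no per-digit loop and no string work exist at all.
import Mathlib
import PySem

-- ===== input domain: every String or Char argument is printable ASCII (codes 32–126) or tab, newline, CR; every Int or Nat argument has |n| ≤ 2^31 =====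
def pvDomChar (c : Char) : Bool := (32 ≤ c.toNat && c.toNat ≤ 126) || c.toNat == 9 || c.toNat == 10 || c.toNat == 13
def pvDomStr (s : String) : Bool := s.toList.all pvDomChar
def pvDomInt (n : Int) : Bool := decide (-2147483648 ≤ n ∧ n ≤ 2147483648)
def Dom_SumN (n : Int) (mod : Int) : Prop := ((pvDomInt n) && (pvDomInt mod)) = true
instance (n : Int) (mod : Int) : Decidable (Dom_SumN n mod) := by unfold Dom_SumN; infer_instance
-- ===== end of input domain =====

-- B replaces A's per-digit greedy simulation (growing digit string, full int() re-parse per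
-- block) by a closed form: per block, (i-1)//15 full cycles of "123432" are folded in as one
-- modular multiply each and a precomputed (offset, leftover) table finishes the block in one
-- lookup. Equivalence is about the return value only (A also prints progress lines).

-- ===== PORT A =====
-- baseString = "123432" (kept as its character list; all string work below is on List Char)
def baseStringA : List Char := ['1', '2', '3', '4', '3', '2']

-- int(s) for the digit strings A accumulates in currV: ported by hand as the decimal fold,
-- exact here because currV is always a nonempty sequence of digit characters str(currAdd).
def intDigitsA (cs : List Char) : Int :=
  cs.foldl (fun a c => 10 * a + (((PySem.Int.digitVal? c).getD 0 : Nat) : Int)) 0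

-- the inner `while currSum < currN` loop; returns (currString, currV) at loop exit.
-- `fuel` is only a totality guard: every iteration adds a digit ≥ 1 to currSum, so
-- currN.toNat units of fuel never run out on a reachable state.
def whileLoopA (currN : Int) (fuel : Nat) (currString currV : List Char) (currSum : Int) :
    List Char × List Char :=
  match fuel with
  | 0 => (currString, currV)                                 -- fuel exhausted: unreachable
  | fuel + 1 =>
    if currSum < currN then
      -- if(len(currString)==0): currString = currString + baseString
      let cs := if PySem.List.len currString = 0 then currString ++ baseStringA else currString
      match PySem.List.pyGet? cs 0 with                      -- currString[0]
      | none => (cs, currV)                                  -- IndexError: unreachable, cs nonempty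
      | some c =>
        let currAdd := (PySem.Int.ofChars? [c]).getD 0       -- int(currString[0]); never none here
        -- currV = currV + str(currAdd) ; currString = currString[1:]
        whileLoopA currN fuel (PySem.List.slice cs (some 1))
          (currV ++ PySem.Int.toChars currAdd) (currSum + currAdd)
    else (currString, currV)

-- one iteration of `for i in range(1, n+1)`: state (currString, currN, theSum)
def stepA (mod : Int) (st : List Char × Int × Int) (_i : Int) : List Char × Int × Int :=
  let res := whileLoopA st.2.1 (st.2.1).toNat st.1 [] 0
  -- theSum += int(currV) % mod ; theSum = theSum % mod ; currN += 1
  (res.1, st.2.1 + 1, PySem.Int.mod (st.2.2 + PySem.Int.mod (intDigitsA res.2) mod) mod)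

def SumN (n : Int) (mod : Int) : Int :=
  ((PySem.List.pyRange 1 (n + 1)).foldl (stepA mod) (baseStringA, 1, 0)).2.2

-- ===== PORT B =====
-- STEP[r][rem]: least digit count k (and the value those digits spell) reaching digit-sum
-- rem from cycle offset r; index 0 of each row is Python's None placeholder.
def stepTableB : List (List (Option (Int × Int))) :=
  [ [none, some (1, 1), some (2, 12), some (2, 12), some (3, 123), some (3, 123), some (3, 123), some (4, 1234), some (4, 1234), some (4, 1234), some (4, 1234), some (5, 12343), some (5, 12343), some (5, 12343), some (6, 123432), some (6, 123432)],
    [none, some (1, 2), some (1, 2), some (2, 23), some (2, 23), some (2, 23), some (3, 234), some (3, 234), some (3, 234), some (3, 234), some (4, 2343), some (4, 2343), some (4, 2343), some (5, 23432), some (5, 23432), some (6, 234321)],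
    [none, some (1, 3), some (1, 3), some (1, 3), some (2, 34), some (2, 34), some (2, 34), some (2, 34), some (3, 343), some (3, 343), some (3, 343), some (4, 3432), some (4, 3432), some (5, 34321), some (6, 343212), some (6, 343212)],
    [none, some (1, 4), some (1, 4), some (1, 4), some (1, 4), some (2, 43), some (2, 43), some (2, 43), some (3, 432), some (3, 432), some (4, 4321), some (5, 43212), some (5, 43212), some (6, 432123), some (6, 432123), some (6, 432123)],
    [none, some (1, 3), some (1, 3), some (1, 3), some (2, 32), some (2, 32), some (3, 321), some (4, 3212), some (4, 3212), some (5, 32123), some (5, 32123), some (5, 32123), some (6, 321234), some (6, 321234), some (6, 321234), some (6, 321234)],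
    [none, some (1, 2), some (1, 2), some (2, 21), some (3, 212), some (3, 212), some (4, 2123), some (4, 2123), some (4, 2123), some (5, 21234), some (5, 21234), some (5, 21234), some (5, 21234), some (6, 212343), some (6, 212343), some (6, 212343)] ]

def cycValB : List Int := [123432, 234321, 343212, 432123, 321234, 212343]
def pow10B : List Int := [1, 10, 100, 1000, 10000, 100000, 1000000]

-- body of one iteration of B's `for i in range(1, n+1)`: from cycle offset r and target i,
-- returns (k, v) = digits consumed and block value mod m
def innerB (m r i : Int) : Int × Int :=
  let q := PySem.Int.floordiv (i - 1) 15                     -- q = (i - 1) // 15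
  let rem := i - 15 * q                                      -- rem = i - 15 * q
  -- for _ in range(q): v = (v * 1000000 + CYCVAL[r]) % mod
  let v := (PySem.List.pyRange 0 q).foldl
    (fun v _ => PySem.Int.mod (v * 1000000 + PySem.List.pyGetD cycValB r 0) m) 0
  -- k, pv = STEP[r][rem]   (the None at index 0 is never reached: rem is in 1..15)
  let e := (PySem.List.pyGetD (PySem.List.pyGetD stepTableB r []) rem none).getD (0, 0)
  (e.1, PySem.Int.mod (v * PySem.List.pyGetD pow10B e.1 0 + e.2) m)

-- state (r, total): total = (total + v) % mod ; r = (r + k) % 6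
def stepBalt (m : Int) (st : Int × Int) (i : Int) : Int × Int :=
  let kv := innerB m st.1 i
  (PySem.Int.mod (st.1 + kv.1) 6, PySem.Int.mod (st.2 + kv.2) m)

def SumN_alt (n : Int) (mod : Int) : Int :=
  ((PySem.List.pyRange 1 (n + 1)).foldl (stepBalt mod) (0, 0)).2

-- ===== PRECONDITION & SPEC =====
-- Pre_ excludes only mod = 0 with n ≥ 1, where A (and B) raise ZeroDivisionError on `% mod`.
def Pre_SumN (n : Int) (mod : Int) : Prop := mod ≠ 0 ∨ n < 1
instance (n : Int) (mod : Int) : Decidable (Pre_SumN n mod) := by unfold Pre_SumN; infer_instance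
def pvWitness_SumN : Int × Int := (6, 100)

def Spec_SumN (n : Int) (mod : Int) (out : Int) : Prop := out = SumN_alt n mod
instance (n : Int) (mod : Int) (out : Int) : Decidable (Spec_SumN n mod out) := by unfold Spec_SumN; infer_instance

-- ===== CLAIM (what is proved, stated in full; the proofs are below) =====
def Claim_equal_SumN : Prop := ∀ (n : Int) (mod : Int), Dom_SumN n mod → Pre_SumN n mod → Spec_SumN n mod (SumN n mod)

-- ===== LEMMAS AND PROOFS =====

-- digit of the infinite stream "123432123432…" at absolute position p
def digT (r : Int) : Int := List.getD [1, 2, 3, 4, 3, 2] r.toNat 0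
def dig (p : Int) : Int := digT (p % 6)

-- sum / characters of the j stream digits starting at absolute position p
def S (p : Int) : Nat → Int
  | 0 => 0
  | j + 1 => dig p + S (p + 1) j

def chars (p : Int) : Nat → List Char
  | 0 => []
  | j + 1 => PySem.Int.toChars (dig p) ++ chars (p + 1) j

-- residue-indexed copies (fully computable for concrete r): S p j = SR (p % 6) j etc.
def SR (r : Int) : Nat → Int
  | 0 => 0
  | j + 1 => digT r + SR ((r + 1) % 6) j

def charsR (r : Int) : Nat → List Char
  | 0 => []
  | j + 1 => PySem.Int.toChars (digT r) ++ charsR ((r + 1) % 6) j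

-- raw (un-modded) decimal value of t full cycles read from offset r
def rawC (r : Int) : Nat → Int
  | 0 => 0
  | t + 1 => rawC r t * 1000000 + PySem.List.pyGetD cycValB r 0

-- B's STEP[r][rem] lookup (definitionally the expression innerB evaluates)
def lookupE (r rem : Int) : Int × Int :=
  (PySem.List.pyGetD (PySem.List.pyGetD stepTableB r []) rem none).getD (0, 0)

-- A's currString is always the tail of the digit cycle starting at stream position p
-- (or empty exactly at a cycle boundary, before the refill).
def StrRelA (cs : List Char) (p : Int) : Prop :=
  cs = baseStringA.drop (p % 6).toNat ∨ (p % 6 = 0 ∧ cs = [])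

-- Python-% respects congruence mod m
lemma pymod_congr {m a b : Int} (hm : m ≠ 0) (h : m ∣ a - b) :
    PySem.Int.mod a m = PySem.Int.mod b m := by
  have ha := PySem.Int.floordiv_mul_add_mod a m
  have hb := PySem.Int.floordiv_mul_add_mod b m
  obtain ⟨k, hk⟩ := h
  have hd : PySem.Int.mod a m - PySem.Int.mod b m
      = m * (k - PySem.Int.floordiv a m + PySem.Int.floordiv b m) := by
    ring_nf; nlinarith [ha, hb, hk]
  have hdvd : |m| ∣ PySem.Int.mod a m - PySem.Int.mod b m := (abs_dvd _ _).mpr ⟨_, hd⟩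
  have hlt : |PySem.Int.mod a m - PySem.Int.mod b m| < |m| := by
    rcases lt_or_gt_of_ne hm with hneg | hpos
    · have h1 := PySem.Int.mod_neg_bounds a hneg
      have h2 := PySem.Int.mod_neg_bounds b hneg
      rw [abs_of_neg hneg]
      apply abs_lt.mpr; constructor <;> omega
    · have h1 := PySem.Int.mod_nonneg a hpos
      have h2 := PySem.Int.mod_nonneg b hpos
      have h3 := PySem.Int.mod_lt a hpos
      have h4 := PySem.Int.mod_lt b hpos
      rw [abs_of_pos hpos]
      apply abs_lt.mpr; constructor <;> omega
  have := Int.eq_zero_of_abs_lt_dvd hdvd hlt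
  omega

-- reducing the accumulator before a shift-and-add does not change the residue
lemma pymod_mul_congr (m a t d : Int) (hm : m ≠ 0) :
    PySem.Int.mod (PySem.Int.mod a m * t + d) m = PySem.Int.mod (a * t + d) m := by
  have ha := PySem.Int.floordiv_mul_add_mod a m
  refine pymod_congr hm ⟨(-(PySem.Int.floordiv a m)) * t, by linear_combination t * ha⟩

lemma pymod_zero (m : Int) : PySem.Int.mod 0 m = 0 :=
  (PySem.Int.mod_eq_zero_iff_dvd 0 m).mpr (dvd_zero m)

lemma drop_of_toNat (l : List Char) (e : Int) (k : Nat) (h : e.toNat = k) :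
    List.drop e.toNat l = List.drop k l := by rw [h]

-- one consumed digit: head character, its value (= dig p), and the new tail
lemma consume (p : Int) : ∃ (c : Char) (rest : List Char) (d : Int),
    baseStringA.drop (p % 6).toNat = c :: rest ∧
    (PySem.Int.ofChars? [c]).getD 0 = d ∧
    d = dig p ∧ PySem.Int.toChars d = [c] ∧
    StrRelA rest (p + 1) := by
  have h6 : p % 6 = 0 ∨ p % 6 = 1 ∨ p % 6 = 2 ∨ p % 6 = 3 ∨ p % 6 = 4 ∨ p % 6 = 5 := by omega
  rcases h6 with h | h | h | h | h | h
  · refine ⟨'1', ['2','3','4','3','2'], 1, ?_, by decide, ?_, by decide, ?_⟩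
    · rw [drop_of_toNat _ _ 0 (by omega)]; decide
    · unfold dig; rw [h]; decide
    · exact Or.inl (by rw [drop_of_toNat _ _ 1 (by omega)]; decide)
  · refine ⟨'2', ['3','4','3','2'], 2, ?_, by decide, ?_, by decide, ?_⟩
    · rw [drop_of_toNat _ _ 1 (by omega)]; decide
    · unfold dig; rw [h]; decide
    · exact Or.inl (by rw [drop_of_toNat _ _ 2 (by omega)]; decide)
  · refine ⟨'3', ['4','3','2'], 3, ?_, by decide, ?_, by decide, ?_⟩
    · rw [drop_of_toNat _ _ 2 (by omega)]; decide
    · unfold dig; rw [h]; decide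
    · exact Or.inl (by rw [drop_of_toNat _ _ 3 (by omega)]; decide)
  · refine ⟨'4', ['3','2'], 4, ?_, by decide, ?_, by decide, ?_⟩
    · rw [drop_of_toNat _ _ 3 (by omega)]; decide
    · unfold dig; rw [h]; decide
    · exact Or.inl (by rw [drop_of_toNat _ _ 4 (by omega)]; decide)
  · refine ⟨'3', ['2'], 3, ?_, by decide, ?_, by decide, ?_⟩
    · rw [drop_of_toNat _ _ 4 (by omega)]; decide
    · unfold dig; rw [h]; decide
    · exact Or.inl (by rw [drop_of_toNat _ _ 5 (by omega)]; decide)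
  · refine ⟨'2', [], 2, ?_, by decide, ?_, by decide, ?_⟩
    · rw [drop_of_toNat _ _ 5 (by omega)]; decide
    · unfold dig; rw [h]; decide
    · exact Or.inr ⟨by omega, rfl⟩

lemma whileA_exit (currN : Int) (fuel : Nat) (cs vch : List Char) (s : Int) (h : ¬ s < currN) :
    whileLoopA currN fuel cs vch s = (cs, vch) := by
  cases fuel with
  | zero => rfl
  | succ fuel => rw [whileLoopA]; simp [h]

lemma whileA_step (currN : Int) (fuel : Nat) (cs rest vch : List Char) (c : Char) (s : Int)
    (h : s < currN)
    (href : (if PySem.List.len cs = 0 then cs ++ baseStringA else cs) = c :: rest) :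
    whileLoopA currN (fuel + 1) cs vch s
      = whileLoopA currN fuel rest (vch ++ PySem.Int.toChars ((PySem.Int.ofChars? [c]).getD 0))
          (s + (PySem.Int.ofChars? [c]).getD 0) := by
  rw [whileLoopA]
  simp only [href, if_pos h]
  simp [PySem.List.slice_from_one]

-- the refilled currString is exactly the canonical tail of the cycle at position p
lemma refill_eq (cs : List Char) (p : Int) (hrel : StrRelA cs p) :
    (if PySem.List.len cs = 0 then cs ++ baseStringA else cs)
      = baseStringA.drop (p % 6).toNat := by
  rcases hrel with h1 | ⟨h1, h2⟩
  · have hk : (p % 6).toNat ≤ 5 := by omega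
    have hlen : cs.length ≠ 0 := by
      subst h1; simp only [List.length_drop, baseStringA, List.length_cons, List.length_nil]; omega
    have hlen' : ¬ (PySem.List.len cs = 0) := by
      rw [PySem.List.len_eq]; exact_mod_cast hlen
    rw [if_neg hlen']; exact h1
  · subst h2
    rw [drop_of_toNat _ _ 0 (by omega)]
    simp [PySem.List.len_eq]

-- A's inner while loop consumes EXACTLY k digits when the running sums before the k-th
-- digit stay below the target and the k-digit sum reaches it
lemma loopA_run : ∀ (k fuel : Nat) (p i s : Int) (cs vch : List Char),
    k ≤ fuel → StrRelA cs p →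
    (∀ j : Nat, j < k → s + S p j < i) → i ≤ s + S p k →
    (whileLoopA i fuel cs vch s).2 = vch ++ chars p k ∧
    StrRelA (whileLoopA i fuel cs vch s).1 (p + k) := by
  intro k
  induction k with
  | zero =>
    intro fuel p i s cs vch _ hrel _ htar
    have hstop : ¬ s < i := by simp only [S] at htar; omega
    rw [whileA_exit _ _ _ _ _ hstop]
    simpa [chars] using hrel
  | succ k IH =>
    intro fuel p i s cs vch hfuel hrel hcond htar
    have hs : s < i := by have := hcond 0 (Nat.succ_pos k); simpa [S] using this
    cases fuel with
    | zero => omega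
    | succ fuel =>
      obtain ⟨c, rest, d, hdrop, hofc, hddig, _, hrest⟩ := consume p
      have href : (if PySem.List.len cs = 0 then cs ++ baseStringA else cs) = c :: rest := by
        rw [refill_eq cs p hrel, hdrop]
      rw [whileA_step i fuel cs rest vch c s hs href, hofc, hddig]
      have h1 : ∀ j : Nat, j < k → (s + dig p) + S (p + 1) j < i := by
        intro j hj
        have := hcond (j + 1) (by omega)
        simpa [S, add_assoc] using this
      have h2 : i ≤ (s + dig p) + S (p + 1) k := by
        simpa [S, add_assoc] using htar
      obtain ⟨hv, hr⟩ := IH fuel (p + 1) i (s + dig p) rest (vch ++ PySem.Int.toChars (dig p))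
        (by omega) hrest h1 h2
      refine ⟨?_, ?_⟩
      · rw [hv]; simp [chars, List.append_assoc]
      · have : p + 1 + (k : Int) = p + ((k : Nat) + 1 : Nat) := by push_cast; ring
        rwa [this] at hr

-- transfer to residue-indexed forms
lemma S_eq : ∀ (j : Nat) (p : Int), S p j = SR (p % 6) j := by
  intro j
  induction j with
  | zero => intro p; rfl
  | succ j IH =>
    intro p
    have h : (p + 1) % 6 = (p % 6 + 1) % 6 := by omega
    simp only [S, SR, dig, IH (p + 1), h]

lemma chars_eq : ∀ (j : Nat) (p : Int), chars p j = charsR (p % 6) j := by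
  intro j
  induction j with
  | zero => intro p; rfl
  | succ j IH =>
    intro j' -- p
    have h : (j' + 1) % 6 = (j' % 6 + 1) % 6 := by omega
    simp only [chars, charsR, dig, IH (j' + 1), h]

-- additivity of sum and characters over a split of the consumed digits
lemma S_add : ∀ (a : Nat) (p : Int) (b : Nat), S p (a + b) = S p a + S (p + a) b := by
  intro a
  induction a with
  | zero => intro p b; simp [S]
  | succ a IH =>
    intro p b
    have h1 : (a + 1) + b = (a + b) + 1 := by omega
    have h2 : p + ((a : Nat) + 1 : Nat) = (p + 1) + (a : Int) := by push_cast; ring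
    rw [h1]
    simp only [S, IH (p + 1) b, h2]
    ring

lemma chars_add : ∀ (a : Nat) (p : Int) (b : Nat),
    chars p (a + b) = chars p a ++ chars (p + a) b := by
  intro a
  induction a with
  | zero => intro p b; simp [chars]
  | succ a IH =>
    intro p b
    have h1 : (a + 1) + b = (a + b) + 1 := by omega
    have h2 : p + ((a : Nat) + 1 : Nat) = (p + 1) + (a : Int) := by push_cast; ring
    rw [h1]
    simp only [chars, IH (p + 1) b, h2, List.append_assoc]

lemma dig_bounds (p : Int) : 1 ≤ dig p ∧ dig p ≤ 4 := by
  unfold dig digT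
  have h : 0 ≤ p % 6 ∧ p % 6 < 6 := by omega
  have h6 : p % 6 = 0 ∨ p % 6 = 1 ∨ p % 6 = 2 ∨ p % 6 = 3 ∨ p % 6 = 4 ∨ p % 6 = 5 := by omega
  rcases h6 with h | h | h | h | h | h <;> rw [h] <;> decide

lemma toChars_dig_len (p : Int) : (PySem.Int.toChars (dig p)).length = 1 := by
  have h := dig_bounds p
  have h4 : dig p = 1 ∨ dig p = 2 ∨ dig p = 3 ∨ dig p = 4 := by omega
  rcases h4 with h | h | h | h <;> rw [h] <;> decide

lemma S_ge : ∀ (j : Nat) (p : Int), (j : Int) ≤ S p j := by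
  intro j
  induction j with
  | zero => intro p; simp [S]
  | succ j IH =>
    intro p
    have := (dig_bounds p).1
    have := IH (p + 1)
    simp only [S]; push_cast; omega

lemma S_mono (p : Int) (a b : Nat) (h : a ≤ b) : S p a ≤ S p b := by
  have h1 : b = a + (b - a) := by omega
  rw [h1, S_add]
  have := S_ge (b - a) (p + a)
  omega

lemma chars_len : ∀ (j : Nat) (p : Int), (chars p j).length = j := by
  intro j
  induction j with
  | zero => intro p; rfl
  | succ j IH =>
    intro p
    simp [chars, toChars_dig_len p, IH (p + 1), Nat.add_comm]

-- decimal-fold of a concatenation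
lemma intDigits_fold_init (y : List Char) : ∀ (a : Int),
    y.foldl (fun a c => 10 * a + (((PySem.Int.digitVal? c).getD 0 : Nat) : Int)) a
      = a * 10 ^ y.length
        + y.foldl (fun a c => 10 * a + (((PySem.Int.digitVal? c).getD 0 : Nat) : Int)) 0 := by
  induction y with
  | nil => intro a; simp
  | cons c y IH =>
    intro a
    simp only [List.foldl_cons, List.length_cons]
    rw [IH (10 * a + _), IH (10 * 0 + _)]
    ring

lemma intDigits_append (x y : List Char) :
    intDigitsA (x ++ y) = intDigitsA x * 10 ^ y.length + intDigitsA y := by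
  unfold intDigitsA
  rw [List.foldl_append, intDigits_fold_init]

-- one full cycle from any offset: digit-sum 15, value = the cycle value at that offset
lemma SR_cyc (r : Int) (h1 : 0 ≤ r) (h2 : r < 6) : SR r 6 = 15 := by
  have h6 : r = 0 ∨ r = 1 ∨ r = 2 ∨ r = 3 ∨ r = 4 ∨ r = 5 := by omega
  rcases h6 with h | h | h | h | h | h <;> rw [h] <;> decide

lemma charsR_cyc (r : Int) (h1 : 0 ≤ r) (h2 : r < 6) :
    intDigitsA (charsR r 6) = PySem.List.pyGetD cycValB r 0 := by
  have h6 : r = 0 ∨ r = 1 ∨ r = 2 ∨ r = 3 ∨ r = 4 ∨ r = 5 := by omega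
  rcases h6 with h | h | h | h | h | h <;> rw [h] <;> decide

lemma S_cycles : ∀ (t : Nat) (p : Int), S p (6 * t) = 15 * (t : Int) := by
  intro t
  induction t with
  | zero => intro p; simp [S]
  | succ t IH =>
    intro p
    have h1 : 6 * (t + 1) = 6 * t + 6 := by omega
    rw [h1, S_add, IH p, S_eq]
    have hm : 0 ≤ (p + (6 * t : Nat)) % 6 ∧ (p + (6 * t : Nat)) % 6 < 6 := by omega
    rw [SR_cyc _ hm.1 hm.2]
    push_cast; ring

lemma ID_cycles : ∀ (t : Nat) (p : Int), intDigitsA (chars p (6 * t)) = rawC (p % 6) t := by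
  intro t
  induction t with
  | zero => intro p; simp [chars, rawC, intDigitsA]
  | succ t IH =>
    intro p
    have h1 : 6 * (t + 1) = 6 * t + 6 := by omega
    have hmod : (p + (6 * t : Nat)) % 6 = p % 6 := by push_cast; omega
    rw [h1, chars_add, intDigits_append, IH p, chars_eq, hmod]
    have hb : 0 ≤ p % 6 ∧ p % 6 < 6 := by omega
    rw [charsR_cyc _ hb.1 hb.2]
    have hlen : (charsR (p % 6) 6).length = 6 := by
      rw [← chars_eq]; exact chars_len 6 p
    rw [hlen]
    simp [rawC]

-- B's cycle loop computes the residue of the raw q-cycle value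
lemma foldB_cycles (m r : Int) (hm : m ≠ 0) : ∀ (t : Nat),
    (PySem.List.pyRange 0 (t : Int)).foldl
        (fun v _ => PySem.Int.mod (v * 1000000 + PySem.List.pyGetD cycValB r 0) m) 0
      = PySem.Int.mod (rawC r t) m := by
  intro t
  induction t with
  | zero => simp [PySem.List.pyRange_one_eq_nil, rawC, pymod_zero]
  | succ t IH =>
    have hc : ((t + 1 : Nat) : Int) = (t : Int) + 1 := by push_cast; ring
    rw [hc, PySem.List.pyRange_one_succ_right (by positivity), List.foldl_append]
    simp only [List.foldl_cons, List.foldl_nil, IH]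
    rw [pymod_mul_congr m (rawC r t) 1000000 _ hm]
    rfl

-- correctness of the STEP/POW10 tables, checked entry by entry
lemma stepFacts (r rem : Int) (hr1 : 0 ≤ r) (hr2 : r < 6) (h1 : 1 ≤ rem) (h2 : rem ≤ 15) :
    (lookupE r rem).1 = ((lookupE r rem).1.toNat : Int) ∧
    1 ≤ (lookupE r rem).1.toNat ∧ (lookupE r rem).1.toNat ≤ 6 ∧
    SR r ((lookupE r rem).1.toNat - 1) < rem ∧ rem ≤ SR r (lookupE r rem).1.toNat ∧
    intDigitsA (charsR r (lookupE r rem).1.toNat) = (lookupE r rem).2 ∧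
    PySem.List.pyGetD pow10B (lookupE r rem).1 0 = 10 ^ (lookupE r rem).1.toNat := by
  interval_cases r <;> interval_cases rem <;> decide

-- one whole block: A's inner while loop against B's closed form
lemma block (m : Int) (hm : m ≠ 0) (p i : Int) (hi : 1 ≤ i) (cs : List Char)
    (hrel : StrRelA cs p) : ∃ K : Nat,
    PySem.Int.mod (intDigitsA (whileLoopA i i.toNat cs [] 0).2) m = (innerB m (p % 6) i).2 ∧
    StrRelA (whileLoopA i i.toNat cs [] 0).1 (p + (K : Int)) ∧
    PySem.Int.mod (p % 6 + (innerB m (p % 6) i).1) 6 = (p + (K : Int)) % 6 := by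
  have hq15 : PySem.Int.floordiv (i - 1) 15 = (i - 1) / 15 :=
    PySem.Int.floordiv_eq_ediv_of_pos (by norm_num)
  set q : Int := PySem.Int.floordiv (i - 1) 15 with hqdef
  have hq0 : 0 ≤ q := by omega
  set rem : Int := i - 15 * q with hremdef
  have hrem : 1 ≤ rem ∧ rem ≤ 15 := by omega
  set r : Int := p % 6 with hrdef
  have hrb : 0 ≤ r ∧ r < 6 := by omega
  obtain ⟨he1, hk1, hk6, hlow, hhigh, hval, hpow⟩ :=
    stepFacts r rem hrb.1 hrb.2 hrem.1 hrem.2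
  set kn : Nat := (lookupE r rem).1.toNat with hkndef
  set qt : Nat := q.toNat with hqtdef
  have hqt : (qt : Int) = q := by omega
  set K : Nat := 6 * qt + kn with hKdef
  -- run A's loop for exactly K digits
  have hSK : S p K = 15 * q + SR r kn := by
    rw [hKdef, S_add, S_cycles, hqt, S_eq]
    have hmod : (p + (6 * qt : Nat)) % 6 = r := by push_cast; omega
    rw [hmod]
  have hSK1 : S p (K - 1) = 15 * q + SR r (kn - 1) := by
    have h1 : K - 1 = 6 * qt + (kn - 1) := by omega
    rw [h1, S_add, S_cycles, hqt, S_eq]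
    have hmod : (p + (6 * qt : Nat)) % 6 = r := by push_cast; omega
    rw [hmod]
  have hknrem : (kn : Int) ≤ rem := by
    have := S_ge (kn - 1) 0
    have h2 : ((kn - 1 : Nat) : Int) ≤ SR r (kn - 1) := by
      have := S_ge (kn - 1) p
      rw [S_eq] at this
      -- SR at offset r: S_ge transferred; r = p % 6
      exact this
    omega
  have hfuel : K ≤ i.toNat := by
    have : (K : Int) ≤ i := by omega
    omega
  have hcond : ∀ j : Nat, j < K → (0 : Int) + S p j < i := by
    intro j hj
    have h1 : S p j ≤ S p (K - 1) := S_mono p j (K - 1) (by omega)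
    omega
  have htar : i ≤ (0 : Int) + S p K := by omega
  obtain ⟨hv, hrel'⟩ := loopA_run K i.toNat p i 0 cs [] hfuel hrel hcond htar
  refine ⟨K, ?_, hrel', ?_⟩
  · -- values agree
    rw [hv]
    simp only [List.nil_append]
    have hsplit : chars p K = chars p (6 * qt) ++ chars (p + (6 * qt : Nat)) kn := by
      rw [hKdef, chars_add]
    have hmod : (p + (6 * qt : Nat)) % 6 = r := by push_cast; omega
    rw [hsplit, intDigits_append, ID_cycles, chars_len, chars_eq, hmod, hval, ← hrdef]
    show PySem.Int.mod (rawC r qt * 10 ^ kn + (lookupE r rem).2) m = (innerB m r i).2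
    unfold innerB
    simp only [← hqdef, ← hremdef]
    rw [show ((PySem.List.pyGetD (PySem.List.pyGetD stepTableB r []) rem none).getD (0, 0))
          = lookupE r rem from rfl]
    rw [← hqt, foldB_cycles m r hm qt, hpow]
    rw [pymod_mul_congr m (rawC r qt) _ _ hm]
  · -- B's next offset is the residue of the next stream position
    have hinner1 : (innerB m r i).1 = (lookupE r rem).1 := by
      unfold innerB
      simp only [← hqdef, ← hremdef]
      rfl
    rw [hinner1, he1, PySem.Int.mod_eq_emod_of_pos (by norm_num)]
    omega

-- the outer folds stay in lockstep (A's currN component equals the lower range bound,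
-- B's offset is the residue of A's absolute stream position)
lemma fold_rel (m : Int) (hm : m ≠ 0) : ∀ (N : Nat) (a b : Int) (cs : List Char) (p total : Int),
    (b - a).toNat = N → 1 ≤ a → StrRelA cs p →
    ((PySem.List.pyRange a b).foldl (stepA m) (cs, a, total)).2.2
      = ((PySem.List.pyRange a b).foldl (stepBalt m) (p % 6, total)).2 := by
  intro N
  induction N using Nat.strong_induction_on with
  | _ N IH =>
    intro a b cs p total hN ha hrel
    by_cases hab : a < b
    · rw [PySem.List.pyRange_one_cons hab]
      simp only [List.foldl_cons, stepA, stepBalt]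
      obtain ⟨K, hval, hrel', hoff⟩ := block m hm p a ha cs hrel
      rw [hval, hoff]
      exact IH (b - (a + 1)).toNat (by omega) (a + 1) b _ (p + (K : Int)) _ rfl (by omega) hrel'
    · rw [PySem.List.pyRange_one_eq_nil (by omega)]; rfl

-- ===== VERDICT (by name: the statement is the Claim_ definition above) =====
theorem SumN_spec : Claim_equal_SumN := by
  intro n mod _hdom hpre
  unfold Spec_SumN SumN SumN_alt
  by_cases hn : n < 1
  · rw [PySem.List.pyRange_one_eq_nil (by omega)]; rfl
  · have hm : mod ≠ 0 := hpre.resolve_right (by omega)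
    have h0 : (0 : Int) % 6 = 0 % 6 := rfl
    have := fold_rel mod hm ((n + 1) - 1).toNat 1 (n + 1) baseStringA 0 0 rfl (by omega)
      (Or.inl rfl)
    simpa using this
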